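-- pv_equiv track=rewrite | github.com/ZoneTwelve/RayCasting2D | maze_generator.py | widen_maze
-- ===== SOURCE A (Python) =====
-- def widen_maze(cells, corridor_width=2):
--     """Expands each path cell into a (corridor_width x corridor_width) block."""
--     in_h = len(cells)
--     in_w = len(cells[0])
--     out_h = in_h * corridor_width
--     out_w = in_w * corridor_width
--     out = [['#' for _ in range(out_w)] for _ in range(out_h)]
--     for y in range(in_h):
--         for x in range(in_w):
--             if cells[y][x] == ' ':
--                 for dy in range(corridor_width):
--                     for dx in range(corridor_width):
--                         out[y*corridor_width+dy][x*corridor_width+dx] = ' '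
--     return out
-- ===== SOURCE B (Python) =====
-- def widen_maze(cells, corridor_width=2):
--     """Expands each path cell into a (corridor_width x corridor_width) block."""
--     w = len(cells[0])
--     out = []
--     for row in cells:
--         wide = []
--         for c in row[:w]:
--             wide += [' ' if c == ' ' else '#'] * corridor_width
--         for _ in range(corridor_width):
--             out.append(list(wide))
--     return out
-- ===== Notes on version B (the rewrite author's own statement) =====
-- stated objective: simpler
-- what changed: Instead of allocating an all-'#' grid and overwriting (corridor_width x corridor_width) blocks with four nested index loops, B makes one pass over the rows, mapping each cell to corridor_width copies of ' ' or '#' in a single expanded row and appending corridor_width independent copies of that row.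
import Mathlib
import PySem

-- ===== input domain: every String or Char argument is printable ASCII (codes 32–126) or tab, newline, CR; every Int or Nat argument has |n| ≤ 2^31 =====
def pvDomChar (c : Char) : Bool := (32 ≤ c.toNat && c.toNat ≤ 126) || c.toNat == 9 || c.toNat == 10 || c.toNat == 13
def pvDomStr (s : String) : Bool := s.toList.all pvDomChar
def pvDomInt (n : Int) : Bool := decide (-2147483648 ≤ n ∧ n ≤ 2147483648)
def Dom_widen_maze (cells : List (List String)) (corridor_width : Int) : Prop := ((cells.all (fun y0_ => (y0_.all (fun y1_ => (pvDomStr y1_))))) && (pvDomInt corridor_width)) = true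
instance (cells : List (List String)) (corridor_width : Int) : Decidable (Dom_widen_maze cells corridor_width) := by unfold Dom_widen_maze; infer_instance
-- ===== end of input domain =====

-- B replaces A's initialize-all-'#'-then-overwrite-blocks four-loop strategy by expanding each
-- row once (cell -> corridor_width chars) and appending corridor_width copies of it: simpler, same cost.


-- ===== PORT A =====
-- literal transliteration: build the all-'#' grid, then overwrite (cw x cw) blocks in place.
-- cells[0] → pyGet?; under Pre_ it is `some`; the `.getD []` default is never used on Pre_.
-- indexed reads/writes cells[y][x], out[i][j] → pyGetD/pySetD; under Pre_ every index is in range.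
def widen_maze (cells : List (List String)) (corridor_width : Int) : List (List String) :=
  let in_h : Int := cells.length
  let in_w : Int := (((PySem.List.pyGet? cells 0).getD []).length : Int)
  let out_h : Int := in_h * corridor_width
  let out_w : Int := in_w * corridor_width
  let out : List (List String) :=
    (PySem.List.pyRange 0 out_h 1).map (fun _ => (PySem.List.pyRange 0 out_w 1).map (fun _ => "#"))
  (PySem.List.pyRange 0 in_h 1).foldl (fun out y =>
    (PySem.List.pyRange 0 in_w 1).foldl (fun out x =>
      if PySem.List.pyGetD (PySem.List.pyGetD cells y []) x "" = " " then
        (PySem.List.pyRange 0 corridor_width 1).foldl (fun out dy =>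
          (PySem.List.pyRange 0 corridor_width 1).foldl (fun out dx =>
            PySem.List.pySetD out (y * corridor_width + dy)
              (PySem.List.pySetD (PySem.List.pyGetD out (y * corridor_width + dy) [])
                (x * corridor_width + dx) " ")) out) out
      else out) out) out

-- ===== PORT B =====
-- literal transliteration of Source B: per row build one expanded row, then append cw copies of it.
def widen_maze_alt (cells : List (List String)) (corridor_width : Int) : List (List String) :=
  let w : Int := (((PySem.List.pyGet? cells 0).getD []).length : Int)
  cells.foldl (fun out row =>
    let wide : List String :=
      (PySem.List.slice row none (some w)).foldl
        (fun wide c => wide ++ List.replicate corridor_width.toNat (if c = " " then " " else "#")) []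
    (PySem.List.pyRange 0 corridor_width 1).foldl (fun out _ => out ++ [wide]) out) []

-- ===== PRECONDITION & SPEC =====
-- Pre_ excludes exactly the inputs where A raises IndexError: empty `cells` (cells[0]) and
-- rows shorter than the first row (cells[y][x] for x < len(cells[0])).
def Pre_widen_maze (cells : List (List String)) (corridor_width : Int) : Prop :=
  cells ≠ [] ∧ ∀ row ∈ cells, (cells.headD []).length ≤ row.length
instance (cells : List (List String)) (corridor_width : Int) : Decidable (Pre_widen_maze cells corridor_width) := by unfold Pre_widen_maze; infer_instance
def pvWitness_widen_maze : List (List String) × Int := ([[" ", "#"], ["#", " "]], 2)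
def Spec_widen_maze (cells : List (List String)) (corridor_width : Int) (out : List (List String)) : Prop := out = widen_maze_alt cells corridor_width
instance (cells : List (List String)) (corridor_width : Int) (out : List (List String)) : Decidable (Spec_widen_maze cells corridor_width out) := by unfold Spec_widen_maze; infer_instance

-- ===== CLAIM (what is proved, stated in full; the proofs are below) =====
def Claim_equal_widen_maze : Prop := ∀ (cells : List (List String)) (corridor_width : Int), Dom_widen_maze cells corridor_width → Pre_widen_maze cells corridor_width → Spec_widen_maze cells corridor_width (widen_maze cells corridor_width)

-- ===== LEMMAS AND PROOFS =====

-- the common value both programs compute: each row of `cells`, truncated to width `w`, each cell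
-- mapped to `k` copies of ' ' / '#', the expanded row repeated `k` times.
def pvCh (c : String) : String := if c = " " then " " else "#"
def pvExpand (k w : Nat) (row : List String) : List String :=
  (row.take w).flatMap (fun c => List.replicate k (pvCh c))
def pvTarget (k w : Nat) (cells : List (List String)) : List (List String) :=
  cells.flatMap (fun row => List.replicate k (pvExpand k w row))

-- `g` with entry `n` rewritten by `f` (reading the old value); r.set n v is pvSetRowF with a
-- constant function, so one family of lemmas serves both grid rows and row cells.
def pvSetRowF {α : Type} (g : List α) (n : Nat) (f : α → α) (d : α) : List α :=
  g.set n (f (g.getD n d))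

theorem pvSetRowF_get {α : Type} (g : List α) (n : Nat) (f : α → α) (d : α) (i : Nat) :
    (pvSetRowF g n f d)[i]? = if i = n then (g[i]?).map f else g[i]? := by
  unfold pvSetRowF
  rw [List.getElem?_set]
  by_cases h : n < g.length
  · by_cases hi : i = n <;>
      simp [hi, h, List.getD_eq_getElem?_getD] <;>
      (intro h'; exact absurd h'.symm hi)
  · by_cases hi : i = n <;>
      simp [hi, h] <;>
      (intro h'; exact absurd h'.symm hi)

theorem pvSetRowF_id {α : Type} (g : List α) (n : Nat) (d : α) :
    pvSetRowF g n id d = g := by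
  unfold pvSetRowF
  by_cases h : n < g.length
  · simp [List.getD_eq_getElem?_getD, List.getElem?_eq_getElem h, List.set_getElem_self]
  · exact List.set_eq_of_length_le (by omega)

theorem pvSetRowF_comp {α : Type} (g : List α) (n : Nat) (f f' : α → α) (d : α) :
    pvSetRowF (pvSetRowF g n f d) n f' d = pvSetRowF g n (f' ∘ f) d := by
  unfold pvSetRowF
  by_cases h : n < g.length
  · simp [List.getD_eq_getElem?_getD, List.getElem?_eq_getElem h, h, List.set_set]
  · rw [List.set_eq_of_length_le (l := g) (by omega), List.set_eq_of_length_le (by omega),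
      List.set_eq_of_length_le (by omega)]

-- a fold of rewrites at ONE index collapses to a single rewrite by the composed function
theorem pvFoldSame {α β : Type} (d : α) (n : Nat) (F : β → α → α) :
    ∀ (fs : List β) (g : List α),
      fs.foldl (fun g b => pvSetRowF g n (F b) d) g
        = pvSetRowF g n (fun r => fs.foldl (fun r b => F b r) r) d := by
  intro fs
  induction fs with
  | nil => intro g; simp [List.foldl]; exact (pvSetRowF_id g n d).symm
  | cons b fs ih =>
      intro g
      simp only [List.foldl_cons]
      rw [ih, pvSetRowF_comp]
      rfl

-- a fold of rewrites at the CONSECUTIVE indices base..base+m-1 by the same function: band update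
theorem pvBand_get {α : Type} (d : α) (base : Nat) (F : α → α) :
    ∀ (m : Nat) (g : List α) (i : Nat),
      ((List.range m).foldl (fun g t => pvSetRowF g (base + t) F d) g)[i]?
        = if base ≤ i ∧ i < base + m then (g[i]?).map F else g[i]? := by
  intro m
  induction m with
  | zero => intro g i; simp
  | succ m ih =>
      intro g i
      rw [List.range_succ, List.foldl_append]
      simp only [List.foldl_cons, List.foldl_nil]
      rw [pvSetRowF_get]
      by_cases hi : i = base + m
      · subst hi
        rw [if_pos rfl, ih]
        rw [if_neg (by omega), if_pos (by omega)]
      · rw [if_neg hi, ih]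
        by_cases hb : base ≤ i ∧ i < base + m
        · rw [if_pos hb, if_pos (by omega)]
        · rw [if_neg hb, if_neg (by omega)]

-- writing ' ' into the k cells x*k .. x*k+k-1 of one row (the dx-loop, collapsed to row level)
def pvBlockSet (k x : Nat) (r : List String) : List String :=
  (List.range k).foldl (fun r d => r.set (x * k + d) " ") r

theorem pvBlockSet_get (k x : Nat) (r : List String) (j : Nat) :
    (pvBlockSet k x r)[j]? =
      if x * k ≤ j ∧ j < x * k + k then (r[j]?).map (fun _ => " ") else r[j]? := by
  exact pvBand_get ("" : String) (x * k) (fun _ => " ") k r j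

-- the effect of the whole x-loop on one row: blocks 0..m-1 written where cond holds
def pvRowFold (k : Nat) (cond : Nat → Bool) (m : Nat) (r : List String) : List String :=
  (List.range m).foldl (fun r x => if cond x then pvBlockSet k x r else r) r

theorem pvRowFold_get (k : Nat) (hk : 0 < k) (cond : Nat → Bool) :
    ∀ (m : Nat) (r : List String) (j : Nat),
      (pvRowFold k cond m r)[j]? =
        if j < m * k ∧ cond (j / k) then (r[j]?).map (fun _ => " ") else r[j]? := by
  intro m
  induction m with
  | zero => intro r j; simp [pvRowFold]
  | succ m ih =>
      intro r j
      have hmk : (m + 1) * k = m * k + k := Nat.succ_mul m k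
      unfold pvRowFold
      rw [List.range_succ, List.foldl_append]
      simp only [List.foldl_cons, List.foldl_nil]
      have hfold : (List.range m).foldl (fun r x => if cond x then pvBlockSet k x r else r) r
          = pvRowFold k cond m r := rfl
      rw [hfold]
      by_cases hc : cond m
      · rw [if_pos hc, pvBlockSet_get]
        by_cases hband : m * k ≤ j ∧ j < m * k + k
        · have hdiv : j / k = m := Nat.div_eq_of_lt_le (by omega) (by rw [Nat.succ_mul]; omega)
          rw [ih, if_pos hband]
          rw [if_neg (by omega), if_pos (by exact ⟨by omega, by rw [hdiv]; exact hc⟩)]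
        · rw [if_neg hband, ih]
          by_cases hlt : j < m * k
          · have : (j < m * k ∧ cond (j / k)) ↔ (j < (m+1) * k ∧ cond (j / k)) := by
              constructor
              · rintro ⟨h1, h2⟩; exact ⟨by omega, h2⟩
              · rintro ⟨h1, h2⟩; exact ⟨hlt, h2⟩
            rw [if_congr this rfl rfl]
          · have hge : m * k + k ≤ j := by omega
            rw [if_neg (by omega), if_neg (by rintro ⟨h1, h2⟩; omega)]
      · rw [if_neg hc, ih]
        by_cases hband : m * k ≤ j ∧ j < m * k + k
        · have hdiv : j / k = m := Nat.div_eq_of_lt_le (by omega) (by rw [Nat.succ_mul]; omega)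
          rw [if_neg (by rintro ⟨h1, h2⟩; omega), if_neg (by rintro ⟨h1, h2⟩; rw [hdiv] at h2; exact hc h2)]
        · by_cases hlt : j < m * k
          · have : (j < m * k ∧ cond (j / k)) ↔ (j < (m+1) * k ∧ cond (j / k)) := by
              constructor
              · rintro ⟨h1, h2⟩; exact ⟨by omega, h2⟩
              · rintro ⟨h1, h2⟩; exact ⟨hlt, h2⟩
            rw [if_congr this rfl rfl]
          · rw [if_neg (by rintro ⟨h1, h2⟩; omega), if_neg (by rintro ⟨h1, h2⟩; omega)]

-- the dy/dx double loop for one cell (y,x): rewrite the k grid rows jk..jk+k-1 by pvBlockSet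
def pvDyDx (k jk x : Nat) (g : List (List String)) : List (List String) :=
  (List.range k).foldl (fun g dy => pvSetRowF g (jk + dy) (pvBlockSet k x) []) g

theorem pvDyDx_get (k jk x : Nat) (g : List (List String)) (i : Nat) :
    (pvDyDx k jk x g)[i]? =
      if jk ≤ i ∧ i < jk + k then (g[i]?).map (pvBlockSet k x) else g[i]? :=
  pvBand_get ([] : List String) jk (pvBlockSet k x) k g i

-- the whole x-loop on the grid: rows jk..jk+k-1 rewritten by pvRowFold, others untouched
def pvXFold (k jk : Nat) (cond : Nat → Bool) (m : Nat) (g : List (List String)) :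
    List (List String) :=
  (List.range m).foldl (fun g x => if cond x then pvDyDx k jk x g else g) g

theorem pvXFold_get (k jk : Nat) (cond : Nat → Bool) :
    ∀ (m : Nat) (g : List (List String)) (i : Nat),
      (pvXFold k jk cond m g)[i]? =
        if jk ≤ i ∧ i < jk + k then (g[i]?).map (pvRowFold k cond m) else g[i]? := by
  intro m
  induction m with
  | zero =>
      intro g i
      simp only [pvXFold, List.range_zero, List.foldl_nil]
      by_cases hb : jk ≤ i ∧ i < jk + k
      · rw [if_pos hb]; cases g[i]? <;> simp [pvRowFold]
      · rw [if_neg hb]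
  | succ m ih =>
      intro g i
      unfold pvXFold
      rw [List.range_succ, List.foldl_append]
      simp only [List.foldl_cons, List.foldl_nil]
      have hfold : (List.range m).foldl (fun g x => if cond x then pvDyDx k jk x g else g) g
          = pvXFold k jk cond m g := rfl
      rw [hfold]
      have hrow : ∀ r : List String, pvRowFold k cond (m + 1) r
          = if cond m then pvBlockSet k m (pvRowFold k cond m r) else pvRowFold k cond m r := by
        intro r
        unfold pvRowFold
        rw [List.range_succ, List.foldl_append]
        simp only [List.foldl_cons, List.foldl_nil]
      by_cases hc : cond m
      · rw [if_pos hc, pvDyDx_get, ih]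
        by_cases hb : jk ≤ i ∧ i < jk + k
        · rw [if_pos hb, if_pos hb, if_pos hb]
          cases g[i]? <;> simp [hrow, hc]
        · rw [if_neg hb, if_neg hb, if_neg hb]
      · rw [if_neg hc, ih]
        by_cases hb : jk ≤ i ∧ i < jk + k
        · rw [if_pos hb, if_pos hb]
          cases g[i]? <;> simp [hrow, hc]
        · rw [if_neg hb, if_neg hb]

theorem pvFlat_get (k : Nat) (hk : 0 < k) :
    ∀ (l : List String) (j : Nat),
      (l.flatMap (fun c => List.replicate k (pvCh c)))[j]? =
        if j < l.length * k then some (pvCh (l.getD (j / k) "")) else none := by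
  intro l
  induction l with
  | nil => intro j; simp
  | cons c l ih =>
      intro j
      rw [List.flatMap_cons]
      by_cases hj : j < k
      · rw [List.getElem?_append_left (by simpa using hj)]
        rw [List.getElem?_replicate, if_pos hj, if_pos (by simp [Nat.succ_mul]; omega)]
        rw [Nat.div_eq_of_lt hj]
        simp
      · rw [List.getElem?_append_right (by simpa using (by omega : k ≤ j))]
        simp only [List.length_replicate]
        rw [ih]
        have hdiv : (j - k) / k = j / k - 1 := by
          have := Nat.sub_mul_div j k 1
          simpa using this
        have hjk : 1 ≤ j / k := (Nat.one_le_div_iff hk).mpr (by omega)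
        by_cases hlt : j - k < l.length * k
        · rw [if_pos hlt, if_pos (by simp [Nat.succ_mul]; omega)]
          rw [hdiv]
          have : l.getD (j / k - 1) "" = (c :: l).getD (j / k) "" := by
            rcases Nat.exists_eq_add_of_le hjk with ⟨t, ht⟩
            rw [ht]
            simp [Nat.add_comm 1 t]
          rw [this]
        · rw [if_neg hlt, if_neg (by simp [Nat.succ_mul]; omega)]

-- the x-loop turns an all-'#' row into the expanded image of `row`
theorem pvRowFold_hash (k : Nat) (hk : 0 < k) (cond : Nat → Bool) (w0 : Nat)
    (row : List String) (hw : w0 ≤ row.length)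
    (hcond : ∀ x, x < w0 → (cond x = true ↔ row.getD x "" = " ")) :
    pvRowFold k cond w0 (List.replicate (w0 * k) "#") = pvExpand k w0 row := by
  apply List.ext_getElem?
  intro j
  rw [pvRowFold_get k hk cond w0 _ j]
  unfold pvExpand
  rw [pvFlat_get k hk _ j]
  rw [List.length_take, Nat.min_eq_left hw]
  by_cases hj : j < w0 * k
  · have hdivlt : j / k < w0 := Nat.div_lt_of_lt_mul (by rw [Nat.mul_comm]; exact hj)
    have htake : (row.take w0).getD (j / k) "" = row.getD (j / k) "" := by
      rw [List.getD_eq_getElem?_getD, List.getD_eq_getElem?_getD, List.getElem?_take,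
        if_pos hdivlt]
    rw [if_pos hj, htake]
    by_cases hc : cond (j / k)
    · rw [if_pos (by exact ⟨hj, hc⟩), List.getElem?_replicate, if_pos hj]
      have hv : row[j / k]?.getD "" = " " := by
        rw [← List.getD_eq_getElem?_getD]; exact (hcond _ hdivlt).mp hc
      simp [pvCh, hv]
    · rw [if_neg (by rintro ⟨h1, h2⟩; exact hc h2), List.getElem?_replicate, if_pos hj]
      have hv : ¬ row[j / k]?.getD "" = " " := by
        rw [← List.getD_eq_getElem?_getD]; exact fun he => hc ((hcond _ hdivlt).mpr he)
      simp [pvCh, hv]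
  · rw [if_neg (by rintro ⟨h1, h2⟩; omega), if_neg hj, List.getElem?_replicate, if_neg hj]

theorem pvThree_get {α : Type} (P R : List α) (k : Nat) (h : α) (i : Nat) :
    (P ++ List.replicate k h ++ R)[i]? =
      if i < P.length then P[i]?
      else if i < P.length + k then some h
      else R[i - (P.length + k)]? := by
  by_cases h1 : i < P.length
  · rw [if_pos h1, List.append_assoc, List.getElem?_append_left h1]
  · rw [if_neg h1, List.append_assoc, List.getElem?_append_right (by omega)]
    by_cases h2 : i < P.length + k
    · rw [if_pos h2, List.getElem?_append_left (by simp; omega), List.getElem?_replicate,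
        if_pos (by omega)]
    · rw [if_neg h2, List.getElem?_append_right (by simp; omega)]
      simp only [List.length_replicate]
      congr 1
      omega

theorem pvTarget_length (k w : Nat) (cells : List (List String)) :
    (pvTarget k w cells).length = cells.length * k := by
  unfold pvTarget
  induction cells with
  | nil => simp
  | cons r cells ih => simp [ih, Nat.succ_mul]; omega

-- one full y-iteration on a grid of shape (done rows) ++ (k fresh '#'-rows) ++ (rest)
theorem pvStep (k w0 : Nat) (hk : 0 < k) (cond : Nat → Bool) (row : List String)
    (hw : w0 ≤ row.length)
    (hcond : ∀ x, x < w0 → (cond x = true ↔ row.getD x "" = " "))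
    (P R : List (List String)) :
    pvXFold k P.length cond w0 (P ++ List.replicate k (List.replicate (w0 * k) "#") ++ R)
      = P ++ List.replicate k (pvExpand k w0 row) ++ R := by
  apply List.ext_getElem?
  intro i
  rw [pvXFold_get, pvThree_get, pvThree_get]
  by_cases h1 : i < P.length
  · rw [if_neg (by omega), if_pos h1, if_pos h1]
  · by_cases h2 : i < P.length + k
    · rw [if_pos (by omega), if_neg h1, if_neg h1, if_pos h2, if_pos h2]
      simp only [Option.map_some]
      rw [pvRowFold_hash k hk cond w0 row hw hcond]
    · rw [if_neg (by omega), if_neg h1, if_neg h1, if_neg h2, if_neg h2]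

def pvCond (cells : List (List String)) (j x : Nat) : Bool :=
  decide ((cells.getD j []).getD x "" = " ")

-- the port's literal inner triple loop for y = j equals the structured pvXFold
theorem pvBodyY_eq (cells : List (List String)) (k : Nat) (w0 : Nat) (j : Nat)
    (g : List (List String)) :
    (PySem.List.pyRange 0 ((w0 : Nat) : Int) 1).foldl (fun out x =>
      if PySem.List.pyGetD (PySem.List.pyGetD cells ((j : Nat) : Int) []) x "" = " " then
        (PySem.List.pyRange 0 ((k : Nat) : Int) 1).foldl (fun out dy =>
          (PySem.List.pyRange 0 ((k : Nat) : Int) 1).foldl (fun out dx =>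
            PySem.List.pySetD out (((j : Nat) : Int) * ((k : Nat) : Int) + dy)
              (PySem.List.pySetD
                (PySem.List.pyGetD out (((j : Nat) : Int) * ((k : Nat) : Int) + dy) [])
                (x * ((k : Nat) : Int) + dx) " ")) out) out
      else out) g
    = pvXFold k (j * k) (pvCond cells j) w0 g := by
  rw [PySem.List.pyRange_zero_nat w0, List.foldl_map]
  have hfun : (fun (out : List (List String)) (x : Nat) =>
      if PySem.List.pyGetD (PySem.List.pyGetD cells ((j : Nat) : Int) []) ((x : Nat) : Int) "" = " " then
        (PySem.List.pyRange 0 ((k : Nat) : Int) 1).foldl (fun out dy =>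
          (PySem.List.pyRange 0 ((k : Nat) : Int) 1).foldl (fun out dx =>
            PySem.List.pySetD out (((j : Nat) : Int) * ((k : Nat) : Int) + dy)
              (PySem.List.pySetD
                (PySem.List.pyGetD out (((j : Nat) : Int) * ((k : Nat) : Int) + dy) [])
                (((x : Nat) : Int) * ((k : Nat) : Int) + dx) " ")) out) out
      else out)
      = (fun out x => if pvCond cells j x then pvDyDx k (j * k) x out else out) := by
    funext out x
    simp only [PySem.List.pyGetD_natCast]
    have hinner : (PySem.List.pyRange 0 ((k : Nat) : Int) 1).foldl (fun out dy =>
          (PySem.List.pyRange 0 ((k : Nat) : Int) 1).foldl (fun out dx =>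
            PySem.List.pySetD out (((j : Nat) : Int) * ((k : Nat) : Int) + dy)
              (PySem.List.pySetD
                (PySem.List.pyGetD out (((j : Nat) : Int) * ((k : Nat) : Int) + dy) [])
                (((x : Nat) : Int) * ((k : Nat) : Int) + dx) " ")) out) out
        = pvDyDx k (j * k) x out := by
      rw [PySem.List.pyRange_zero_nat k, List.foldl_map]
      have hdyfun : ∀ (out : List (List String)) (dy : Nat),
          ((List.range k).map (fun t => ((t : Nat) : Int))).foldl (fun out dx =>
            PySem.List.pySetD out (((j : Nat) : Int) * ((k : Nat) : Int) + ((dy : Nat) : Int))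
              (PySem.List.pySetD
                (PySem.List.pyGetD out (((j : Nat) : Int) * ((k : Nat) : Int) + ((dy : Nat) : Int)) [])
                (((x : Nat) : Int) * ((k : Nat) : Int) + dx) " ")) out
          = pvSetRowF out (j * k + dy) (pvBlockSet k x) [] := by
        intro out dy
        rw [List.foldl_map]
        have hbody : (fun (out : List (List String)) (dx : Nat) =>
            PySem.List.pySetD out (((j : Nat) : Int) * ((k : Nat) : Int) + ((dy : Nat) : Int))
              (PySem.List.pySetD
                (PySem.List.pyGetD out (((j : Nat) : Int) * ((k : Nat) : Int) + ((dy : Nat) : Int)) [])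
                (((x : Nat) : Int) * ((k : Nat) : Int) + ((dx : Nat) : Int)) " "))
            = (fun out dx => pvSetRowF out (j * k + dy) (fun r => r.set (x * k + dx) " ") []) := by
          funext out dx
          simp only [← Nat.cast_mul, ← Nat.cast_add, PySem.List.pySetD_natCast,
            PySem.List.pyGetD_natCast]
          rfl
        rw [hbody, pvFoldSame]
        rfl
      rw [funext fun out => funext (hdyfun out)]
      rfl
    rw [hinner]
    by_cases hc : (cells.getD j []).getD x "" = " "
    · rw [if_pos hc, if_pos (by simpa [pvCond] using hc)]
    · rw [if_neg hc, if_neg (by simpa [pvCond] using hc)]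
  rw [hfun]
  rfl

-- the y-loop from row j: expands the remaining m = n - j bands of fresh '#'-rows
theorem pvMain (cells : List (List String)) (k w0 : Nat) (hk : 0 < k)
    (hw : ∀ row ∈ cells, w0 ≤ row.length) :
    ∀ (m j : Nat), j + m = cells.length →
      (PySem.List.pyRange ((j : Nat) : Int) ((cells.length : Nat) : Int) 1).foldl (fun out y =>
        (PySem.List.pyRange 0 ((w0 : Nat) : Int) 1).foldl (fun out x =>
          if PySem.List.pyGetD (PySem.List.pyGetD cells y []) x "" = " " then
            (PySem.List.pyRange 0 ((k : Nat) : Int) 1).foldl (fun out dy =>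
              (PySem.List.pyRange 0 ((k : Nat) : Int) 1).foldl (fun out dx =>
                PySem.List.pySetD out (y * ((k : Nat) : Int) + dy)
                  (PySem.List.pySetD (PySem.List.pyGetD out (y * ((k : Nat) : Int) + dy) [])
                    (x * ((k : Nat) : Int) + dx) " ")) out) out
          else out) out)
        (pvTarget k w0 (cells.take j)
          ++ List.replicate (m * k) (List.replicate (w0 * k) "#"))
      = pvTarget k w0 cells := by
  intro m
  induction m with
  | zero =>
      intro j hj
      rw [PySem.List.pyRange_one_eq_nil (a := ((j : Nat) : Int)) (b := ((cells.length : Nat) : Int))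
        (by exact_mod_cast (by omega : cells.length ≤ j))]
      simp only [List.foldl_nil, Nat.zero_mul, List.replicate_zero, List.append_nil]
      rw [(by omega : j = cells.length), List.take_length]
  | succ m ih =>
      intro j hj
      have hjn : j < cells.length := by omega
      rw [PySem.List.pyRange_one_cons (a := ((j : Nat) : Int)) (b := ((cells.length : Nat) : Int))
        (by exact_mod_cast hjn)]
      rw [List.foldl_cons]
      rw [pvBodyY_eq cells k w0 j]
      have hsplit : (m + 1) * k = k + m * k := by rw [Nat.succ_mul]; omega
      rw [hsplit, List.replicate_add, ← List.append_assoc]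
      have hP : (pvTarget k w0 (cells.take j)).length = j * k := by
        rw [pvTarget_length, List.length_take, Nat.min_eq_left (by omega)]
      rw [← hP]
      rw [pvStep k w0 hk (pvCond cells j) (cells.getD j []) (by
          have : cells.getD j [] ∈ cells := by
            rw [List.getD_eq_getElem?_getD, List.getElem?_eq_getElem hjn]
            exact List.getElem_mem hjn
          exact hw _ this)
        (by intro x hx; simp [pvCond])]
      have hT : pvTarget k w0 (cells.take j)
            ++ List.replicate k (pvExpand k w0 (cells.getD j []))
          = pvTarget k w0 (cells.take (j + 1)) := by
        rw [List.take_succ_eq_append_getElem hjn]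
        unfold pvTarget
        rw [List.flatMap_append, List.flatMap_cons, List.flatMap_nil, List.append_nil]
        rw [List.getD_eq_getElem?_getD, List.getElem?_eq_getElem hjn]
        rfl
      rw [hT]
      rw [(by push_cast; ring : ((j : Nat) : Int) + 1 = (((j + 1 : Nat) : Nat) : Int))]
      exact ih (j + 1) (by omega)

theorem pvHeadD (cells : List (List String)) :
    (PySem.List.pyGet? cells 0).getD [] = cells.headD [] := by
  rw [PySem.List.pyGet?_zero]
  cases cells <;> simp

theorem pvAppendCopies {α β : Type} (x : List α) :
    ∀ (l : List β) (a : List (List α)),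
      l.foldl (fun a _ => a ++ [x]) a = a ++ List.replicate l.length x := by
  intro l
  induction l with
  | nil => intro a; simp
  | cons b l ih => intro a; simp [ih, List.append_assoc, List.replicate_succ]

theorem pvA_eq (cells : List (List String)) (cw : Int)
    (hw : ∀ row ∈ cells, (cells.headD []).length ≤ row.length) :
    widen_maze cells cw = pvTarget cw.toNat (cells.headD []).length cells := by
  show ((PySem.List.pyRange 0 ((cells.length : Int)) 1).foldl (fun out y =>
      (PySem.List.pyRange 0 ((((PySem.List.pyGet? cells 0).getD []).length : Int)) 1).foldl (fun out x =>
        if PySem.List.pyGetD (PySem.List.pyGetD cells y []) x "" = " " then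
          (PySem.List.pyRange 0 cw 1).foldl (fun out dy =>
            (PySem.List.pyRange 0 cw 1).foldl (fun out dx =>
              PySem.List.pySetD out (y * cw + dy)
                (PySem.List.pySetD (PySem.List.pyGetD out (y * cw + dy) []) (x * cw + dx) " ")) out) out
        else out) out)
      ((PySem.List.pyRange 0 ((cells.length : Int) * cw) 1).map (fun _ =>
        (PySem.List.pyRange 0 ((((PySem.List.pyGet? cells 0).getD []).length : Int) * cw) 1).map
          (fun _ => "#"))))
    = pvTarget cw.toNat (cells.headD []).length cells
  rw [pvHeadD]
  rcases lt_or_ge 0 cw with hpos | hle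
  · have hcw : ((cw.toNat : Nat) : Int) = cw := Int.toNat_of_nonneg hpos.le
    have hk : 0 < cw.toNat := Int.natCast_pos.mp (by rw [hcw]; exact hpos)
    rw [← hcw]
    have hout0 : ((PySem.List.pyRange 0 ((cells.length : Int) * ((cw.toNat : Nat) : Int)) 1).map (fun _ =>
        (PySem.List.pyRange 0 (((cells.headD []).length : Int) * ((cw.toNat : Nat) : Int)) 1).map
          (fun _ => "#")))
        = List.replicate (cells.length * cw.toNat)
            (List.replicate ((cells.headD []).length * cw.toNat) "#") := by
      rw [← Nat.cast_mul, ← Nat.cast_mul, PySem.List.pyRange_zero_nat, PySem.List.pyRange_zero_nat,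
        List.map_map, List.map_map]
      simp [Function.comp_def, List.map_const']
    rw [hout0]
    have hmain := pvMain cells cw.toNat (cells.headD []).length hk hw cells.length 0 (by omega)
    simp only [Nat.cast_zero, List.take_zero] at hmain
    simp only [pvTarget, List.flatMap_nil, List.nil_append] at hmain
    simp only [pvTarget]
    exact hmain
  · have hk0 : cw.toNat = 0 := Int.toNat_of_nonpos (by omega)
    have hout0nil : PySem.List.pyRange 0 ((cells.length : Int) * cw) 1 = [] :=
      PySem.List.pyRange_one_eq_nil (mul_nonpos_of_nonneg_of_nonpos (by positivity) (by omega))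
    rw [hout0nil]
    simp only [List.map_nil]
    simp only [PySem.List.pyRange_one_eq_nil (show cw ≤ 0 by omega), List.foldl_nil, ite_self,
      List.foldl_fixed]
    simp [pvTarget, hk0]

theorem pvB_eq (cells : List (List String)) (cw : Int) :
    widen_maze_alt cells cw = pvTarget cw.toNat (cells.headD []).length cells := by
  show (cells.foldl (fun out row =>
      (PySem.List.pyRange 0 cw 1).foldl (fun out _ => out ++ [
        (PySem.List.slice row none (some ((((PySem.List.pyGet? cells 0).getD []).length : Nat) : Int))).foldl
          (fun wide c => wide ++ List.replicate cw.toNat (if c = " " then " " else "#")) []]) out) [])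
    = pvTarget cw.toNat (cells.headD []).length cells
  rw [pvHeadD]
  have hfun : (fun (out : List (List String)) (row : List String) =>
      (PySem.List.pyRange 0 cw 1).foldl (fun out _ => out ++ [
        (PySem.List.slice row none (some ((cells.headD []).length : Int))).foldl
          (fun wide c => wide ++ List.replicate cw.toNat (if c = " " then " " else "#")) []]) out)
      = (fun out row => out ++ List.replicate cw.toNat (pvExpand cw.toNat (cells.headD []).length row)) := by
    funext out row
    rw [PySem.List.pyRange_zero, List.foldl_map, pvAppendCopies, List.length_range]
    congr 1
    congr 1
    rw [PySem.List.slice_to_natCast, PySem.List.foldl_append_eq_flatMap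
      (fun c => List.replicate cw.toNat (if c = " " then " " else "#"))]
    simp [pvExpand, pvCh]
  rw [hfun, PySem.List.foldl_append_eq_flatMap
    (fun row => List.replicate cw.toNat (pvExpand cw.toNat (cells.headD []).length row))]
  simp [pvTarget]

-- ===== VERDICT (by name: the statement is the Claim_ definition above) =====
theorem widen_maze_spec : Claim_equal_widen_maze := by
  intro cells cw _ hpre
  unfold Spec_widen_maze
  rw [pvA_eq cells cw hpre.2, pvB_eq]
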